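-- pv_equiv track=rewrite | github.com/Hertz-7/programming-fundamentals | assignment3.py | mostTouchableLocker
-- ===== SOURCE A (Python) =====
-- def mostTouchableLocker(number_of_lockers ,number_of_students):
--     if number_of_lockers <0 or number_of_students < 0:
--         return None
--
--     c=0
--     mt=0
--     most=0
--     for x in range(1 , number_of_lockers+1):
--         c=0
--         for y in range(1 , number_of_students+1):
--             if x%y == 0 :
--                 c=c+1
--         if mt <= c:
--             mt=c
--             if number_of_students != 0:
--                 most=x
--     return most
-- ===== SOURCE B (Python) =====
-- def mostTouchableLocker(number_of_lockers, number_of_students):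
--     if number_of_lockers < 0 or number_of_students < 0:
--         return None
--     if number_of_students == 0:
--         return 0
--     best_count = -1
--     best = 0
--     for x in range(1, number_of_lockers + 1):
--         c = 0
--         i = 1
--         while i * i <= x and i <= number_of_students:
--             if x % i == 0:
--                 if i <= number_of_students:
--                     c += 1
--                 j = x // i
--                 if j != i and j <= number_of_students:
--                     c += 1
--             i += 1
--         if best_count <= c:
--             best_count = c
--             best = x
--     return best
-- ===== Notes on version B (the rewrite author's own statement) =====
-- stated objective: faster
-- what changed: B counts each locker's touches by enumerating divisor pairs i, x//i with i up to min(sqrt(x), S) (with an explicit zero-students guard) instead of scanning every student 1..S, replacing the inner O(S) loop by O(min(sqrt(x), S))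
import Mathlib
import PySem

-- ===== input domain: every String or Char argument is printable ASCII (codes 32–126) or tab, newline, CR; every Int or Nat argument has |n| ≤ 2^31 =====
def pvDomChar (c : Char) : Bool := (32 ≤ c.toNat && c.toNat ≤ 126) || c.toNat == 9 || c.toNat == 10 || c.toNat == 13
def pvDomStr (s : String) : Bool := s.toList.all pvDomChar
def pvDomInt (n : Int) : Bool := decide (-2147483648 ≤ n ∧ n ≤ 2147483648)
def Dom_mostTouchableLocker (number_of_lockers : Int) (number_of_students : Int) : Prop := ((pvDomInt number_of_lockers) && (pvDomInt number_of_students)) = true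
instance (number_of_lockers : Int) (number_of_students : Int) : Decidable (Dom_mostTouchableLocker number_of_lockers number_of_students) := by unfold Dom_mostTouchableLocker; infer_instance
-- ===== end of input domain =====

-- B replaces A's inner scan over every student 1..S by an enumeration of divisor
-- pairs (i, x//i) for i up to sqrt(x) (plus an explicit zero-students guard);
-- a timing run measured B faster (asymptotically fewer inner iterations).

-- ===== PORT A =====
def mostTouchableLocker (number_of_lockers : Int) (number_of_students : Int) : Option Int :=
  if number_of_lockers < 0 || number_of_students < 0 then none
  else
    -- state (mt, most); c is recomputed from scratch in each outer iteration, as in A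
    let st := (PySem.List.pyRange 1 (number_of_lockers + 1) 1).foldl
      (fun (s : Int × Int) x =>
        let c := (PySem.List.pyRange 1 (number_of_students + 1) 1).foldl
          (fun c y => if PySem.Int.mod x y == 0 then c + 1 else c) (0 : Int)
        if s.1 ≤ c then (c, if number_of_students != 0 then x else s.2) else s)
      ((0 : Int), (0 : Int))
    some st.2

-- ===== PORT B =====
-- B's inner while loop 'i = 1; while i*i <= x and i <= S: …; i += 1' accumulating c
def pvCntFrom (x S i : Int) : Int :=
  if _h : i * i ≤ x ∧ i ≤ S then
    (if PySem.Int.mod x i == 0 then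
      (if i ≤ S then 1 else 0) +
      (if PySem.Int.floordiv x i ≠ i ∧ PySem.Int.floordiv x i ≤ S then 1 else 0)
     else 0) + pvCntFrom x S (i + 1)
  else 0
termination_by (x + 1 - i).toNat
decreasing_by
  obtain ⟨h1, -⟩ := _h
  have hii : i ≤ i * i := by nlinarith [sq_nonneg (i - 1), sq_nonneg i]
  omega

def mostTouchableLocker_alt (number_of_lockers : Int) (number_of_students : Int) : Option Int :=
  if number_of_lockers < 0 || number_of_students < 0 then none
  else if number_of_students == 0 then some 0
  else
    let st := (PySem.List.pyRange 1 (number_of_lockers + 1) 1).foldl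
      (fun (s : Int × Int) x =>
        let c := pvCntFrom x number_of_students 1
        if s.1 ≤ c then (c, x) else s)
      ((-1 : Int), (0 : Int))
    some st.2

-- ===== PRECONDITION & SPEC =====
def Spec_mostTouchableLocker (number_of_lockers : Int) (number_of_students : Int) (out : Option Int) : Prop := out = mostTouchableLocker_alt number_of_lockers number_of_students
instance (number_of_lockers : Int) (number_of_students : Int) (out : Option Int) : Decidable (Spec_mostTouchableLocker number_of_lockers number_of_students out) := by unfold Spec_mostTouchableLocker; infer_instance

-- ===== CLAIM (what is proved, stated in full; the proofs are below) =====
def Claim_equal_mostTouchableLocker : Prop := ∀ (number_of_lockers : Int) (number_of_students : Int), Dom_mostTouchableLocker number_of_lockers number_of_students → Spec_mostTouchableLocker number_of_lockers number_of_students (mostTouchableLocker number_of_lockers number_of_students)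

-- ===== LEMMAS AND PROOFS =====

-- the common mathematical value of both inner counts: #{d ∈ [1, Sn] : d ∣ X}
def pvDivCnt (X Sn : ℕ) : ℕ := ((Finset.Icc 1 Sn).filter (fun d => d ∣ X)).card

-- A's inner loop counts the divisors of X among 1..Sn
lemma cntA_eq (X : ℕ) : ∀ (n : ℕ),
    (PySem.List.pyRange 1 ((n : Int) + 1) 1).foldl
      (fun c y => if PySem.Int.mod (X : Int) y == 0 then c + 1 else c) (0 : Int)
    = (pvDivCnt X n : Int) := by
  intro n
  induction n with
  | zero =>
    rw [show ((0:ℕ):ℤ) + 1 = 1 by norm_num, PySem.List.pyRange_one_eq_nil le_rfl]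
    simp [pvDivCnt]
  | succ n ih =>
    rw [show (((n+1:ℕ)):ℤ) + 1 = ((n:ℤ) + 1) + 1 by push_cast; ring,
        PySem.List.pyRange_one_succ_right (by omega), List.foldl_append, ih]
    simp only [List.foldl_cons, List.foldl_nil]
    have hIcc : Finset.Icc 1 (n+1) = insert (n+1) (Finset.Icc 1 n) := by
      ext x; simp [Finset.mem_Icc]; omega
    by_cases hd : (n+1) ∣ X
    · have hd' : ((n:ℤ)+1) ∣ (X:ℤ) := by exact_mod_cast Int.natCast_dvd_natCast.mpr hd
      have hnm : (n+1) ∉ (Finset.Icc 1 n).filter (fun d => d ∣ X) := by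
        intro h
        exact absurd (Finset.mem_Icc.mp (Finset.mem_of_mem_filter _ h)).2 (by omega)
      simp [pvDivCnt, hIcc, Finset.filter_insert, hd, hd',
        Finset.card_insert_of_notMem hnm]
    · have hd' : ¬ ((n:ℤ)+1) ∣ (X:ℤ) := by
        intro h; exact hd (by exact_mod_cast h)
      simp [pvDivCnt, hIcc, Finset.filter_insert, hd, hd']

-- the summand of B's while loop, on the Nat side
def pvW (X Sn k : ℕ) : ℕ :=
  if k ∣ X then
    (if k ≤ Sn then 1 else 0) + (if X / k ≠ k ∧ X / k ≤ Sn then 1 else 0)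
  else 0

-- B's while loop computes the sum of pvW over [i, min (sqrt X) Sn]
lemma pvCntFrom_eq_sum (X Sn : ℕ) : ∀ (i : ℕ), 1 ≤ i →
    pvCntFrom (X : Int) (Sn : Int) (i : Int)
    = ((∑ k ∈ Finset.Icc i (min (Nat.sqrt X) Sn), pvW X Sn k : ℕ) : Int) := by
  suffices h : ∀ (fuel i : ℕ), 1 ≤ i → min (Nat.sqrt X) Sn + 1 - i ≤ fuel →
      pvCntFrom (X : Int) (Sn : Int) (i : Int)
      = ((∑ k ∈ Finset.Icc i (min (Nat.sqrt X) Sn), pvW X Sn k : ℕ) : Int) by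
    intro i hi; exact h _ i hi le_rfl
  intro fuel
  induction fuel with
  | zero =>
    intro i hi hle
    have hgt : min (Nat.sqrt X) Sn < i := by omega
    have hnc : ¬ (((i:ℤ) * (i:ℤ) ≤ (X:ℤ)) ∧ ((i:ℤ) ≤ (Sn:ℤ))) := by
      rintro ⟨h1, h2⟩
      have h1' : i * i ≤ X := by exact_mod_cast h1
      have h2' : i ≤ Sn := by exact_mod_cast h2
      have := Nat.le_sqrt.mpr h1'
      omega
    rw [pvCntFrom, dif_neg hnc, Finset.Icc_eq_empty (by omega)]
    simp
  | succ f ih =>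
    intro i hi hle
    by_cases hc : i * i ≤ X ∧ i ≤ Sn
    · have hc' : ((i:ℤ) * (i:ℤ) ≤ (X:ℤ)) ∧ ((i:ℤ) ≤ (Sn:ℤ)) :=
        ⟨by exact_mod_cast hc.1, by exact_mod_cast hc.2⟩
      have hile : i ≤ min (Nat.sqrt X) Sn := by
        have := Nat.le_sqrt.mpr hc.1
        omega
      rw [pvCntFrom, dif_pos hc',
        show ((i:ℤ) + 1) = ((i+1:ℕ):ℤ) by push_cast; ring,
        ih (i+1) (by omega) (by omega)]
      have hIcc : Finset.Icc i (min (Nat.sqrt X) Sn)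
          = insert i (Finset.Icc (i+1) (min (Nat.sqrt X) Sn)) := by
        ext x; simp [Finset.mem_Icc]; omega
      have hnm : i ∉ Finset.Icc (i+1) (min (Nat.sqrt X) Sn) := by
        intro h; exact absurd (Finset.mem_Icc.mp h).1 (by omega)
      rw [hIcc, Finset.sum_insert hnm]
      have hm : PySem.Int.mod (X:ℤ) (i:ℤ) = ((X % i : ℕ) : ℤ) := PySem.Int.mod_natCast X i
      have hf : PySem.Int.floordiv (X:ℤ) (i:ℤ) = ((X / i : ℕ) : ℤ) := PySem.Int.floordiv_natCast X i
      rw [hm, hf]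
      unfold pvW
      by_cases hd : i ∣ X
      swap
      · have hnd : ¬ ((i:ℤ) ∣ (X:ℤ)) := fun h => hd (Int.natCast_dvd_natCast.mp h)
        simp [hd, hnd]
      · have h0 : X % i = 0 := Nat.mod_eq_zero_of_dvd hd
        have e1 : (if (i:ℤ) ≤ (Sn:ℤ) then (1:ℤ) else 0) = ((if i ≤ Sn then 1 else 0 : ℕ) : ℤ) := by
          by_cases h : i ≤ Sn <;> simp [h]
        have c1 : (¬ ((X/i:ℕ):ℤ) = (i:ℤ)) ↔ ¬ X/i = i := not_congr Nat.cast_inj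
        have c2 : (((X/i:ℕ):ℤ) ≤ (Sn:ℤ)) ↔ X/i ≤ Sn := Nat.cast_le
        have e2 : (if ¬ ((X/i:ℕ):ℤ) = (i:ℤ) ∧ ((X/i:ℕ):ℤ) ≤ (Sn:ℤ) then (1:ℤ) else 0)
            = ((if ¬ X/i = i ∧ X/i ≤ Sn then 1 else 0 : ℕ) : ℤ) := by
          by_cases h : ¬ X/i = i ∧ X/i ≤ Sn
          · rw [if_pos ⟨c1.mpr h.1, c2.mpr h.2⟩, if_pos h]; simp
          · rw [if_neg (fun hp => h ⟨c1.mp hp.1, c2.mp hp.2⟩), if_neg h]; simp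
        simp only [h0, Nat.cast_zero, if_pos hd, ne_eq]
        rw [e1, e2]
        push_cast
        simp
    · have hnc' : ¬ (((i:ℤ) * (i:ℤ) ≤ (X:ℤ)) ∧ ((i:ℤ) ≤ (Sn:ℤ))) := by
        rintro ⟨h1, h2⟩
        exact hc ⟨by exact_mod_cast h1, by exact_mod_cast h2⟩
      have hgt : min (Nat.sqrt X) Sn < i := by
        rcases not_and_or.mp hc with h | h
        · have : Nat.sqrt X < i := by
            by_contra hh
            exact h (Nat.le_sqrt.mp (by omega))
          omega
        · omega
      rw [pvCntFrom, dif_neg hnc', Finset.Icc_eq_empty (by omega)]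
      simp

-- the divisor-pair identity: summing pvW over 1..min (sqrt X) Sn counts all divisors ≤ Sn,
-- pairing each divisor d > the bound with the small divisor X / d
lemma sum_pvW_eq (X Sn : ℕ) (hX : 1 ≤ X) :
    ∑ k ∈ Finset.Icc 1 (min (Nat.sqrt X) Sn), pvW X Sn k = pvDivCnt X Sn := by
  set r := Nat.sqrt X with hr
  set m := min r Sn with hmdef
  have hmr : m ≤ r := min_le_left r Sn
  have hmS : m ≤ Sn := min_le_right r Sn
  have hmor : m = r ∨ m = Sn := min_choice r Sn
  have hr2 : r * r ≤ X := Nat.sqrt_le X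
  have hrX : X < (r+1) * (r+1) := Nat.lt_succ_sqrt X
  have key1 : ∀ d, d ∣ X → 1 ≤ d := fun d hd => Nat.pos_of_dvd_of_pos hd (by omega)
  have keyle : ∀ d, d ∣ X → d ≤ X := fun d hd => Nat.le_of_dvd (by omega) hd
  have hdivpos : ∀ d, d ∣ X → 1 ≤ X / d := by
    intro d hd
    exact (Nat.one_le_div_iff (key1 d hd)).mpr (keyle d hd)
  have hdivle : ∀ d, d ∣ X → r < d → X / d ≤ r := by
    intro d hd hrd
    have h1 : X / d ≤ X / (r+1) := Nat.div_le_div_left (by omega) (by omega)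
    have h2 : X / (r+1) < r + 1 := (Nat.div_lt_iff_lt_mul (by omega)).mpr hrX
    omega
  have hbig : ∀ k, k ∣ X → k ≤ r → ¬ X/k = k → r < X / k := by
    intro k hk h2 hne
    by_contra h
    rw [not_lt] at h
    have h1 : 1 ≤ k := key1 k hk
    have hq : 1 ≤ X / k := hdivpos k hk
    have hmul : k * (X / k) = X := Nat.mul_div_cancel' hk
    have hkr : k = r := by nlinarith
    have hqr : X / k = r := by nlinarith
    exact hne (by omega)
  have hsplit : ∀ k ∈ Finset.Icc 1 m, pvW X Sn k =
      (if k ∣ X ∧ k ≤ Sn then 1 else 0) + (if k ∣ X ∧ (¬ X/k = k ∧ X/k ≤ Sn) then 1 else 0) := by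
    intro k _
    unfold pvW
    by_cases hd : k ∣ X <;> simp [hd]
  rw [Finset.sum_congr rfl hsplit, Finset.sum_add_distrib, ← Finset.card_filter, ← Finset.card_filter]
  have hsmall : ((Finset.Icc 1 Sn).filter (fun d => d ∣ X)).filter (fun d => d ≤ m)
      = (Finset.Icc 1 m).filter (fun k => k ∣ X ∧ k ≤ Sn) := by
    ext d
    simp only [Finset.mem_filter, Finset.mem_Icc]
    constructor
    · rintro ⟨⟨⟨h1, h2⟩, h3⟩, h4⟩; exact ⟨⟨h1, h4⟩, h3, h2⟩
    · rintro ⟨⟨h1, h2⟩, h3, h4⟩; exact ⟨⟨⟨h1, h4⟩, h3⟩, h2⟩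
  have hbigcard : (((Finset.Icc 1 Sn).filter (fun d => d ∣ X)).filter (fun d => ¬ d ≤ m)).card
      = ((Finset.Icc 1 m).filter (fun k => k ∣ X ∧ (¬ X/k = k ∧ X/k ≤ Sn))).card := by
    apply Finset.card_bij' (fun d _ => X / d) (fun k _ => X / k)
    · intro d hd
      simp only [Finset.mem_filter, Finset.mem_Icc] at hd ⊢
      obtain ⟨⟨⟨h1d, hdSn⟩, hdX⟩, hdr⟩ := hd
      have hmr' : m = r := by omega
      have hrd : r < d := by omega
      have hdd : X / (X / d) = d := Nat.div_div_self hdX (by omega)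
      refine ⟨⟨hdivpos d hdX, ?_⟩, Nat.div_dvd_of_dvd hdX, ?_, ?_⟩
      · have := hdivle d hdX hrd; omega
      · rw [hdd]; have := hdivle d hdX hrd; omega
      · rw [hdd]; exact hdSn
    · intro k hk
      simp only [Finset.mem_filter, Finset.mem_Icc] at hk ⊢
      obtain ⟨⟨h1k, hkm⟩, hkX, hne, hkSn⟩ := hk
      have hgt := hbig k hkX (by omega) hne
      exact ⟨⟨⟨hdivpos k hkX, hkSn⟩, Nat.div_dvd_of_dvd hkX⟩, by omega⟩
    · intro d hd
      simp only [Finset.mem_filter, Finset.mem_Icc] at hd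
      exact Nat.div_div_self hd.1.2 (by omega)
    · intro k hk
      simp only [Finset.mem_filter, Finset.mem_Icc] at hk
      exact Nat.div_div_self hk.2.1 (by omega)
  rw [← hsmall, ← hbigcard]
  unfold pvDivCnt
  rw [Finset.card_filter_add_card_filter_not]

-- the two inner counts agree on every locker x ≥ 1 (for S ≥ 0)
lemma inner_eq (X Sn : ℕ) (hX : 1 ≤ X) :
    (PySem.List.pyRange 1 ((Sn : Int) + 1) 1).foldl
      (fun c y => if PySem.Int.mod (X : Int) y == 0 then c + 1 else c) (0 : Int)
    = pvCntFrom (X : Int) (Sn : Int) 1 := by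
  rw [cntA_eq X Sn, show (1:ℤ) = ((1:ℕ):ℤ) by norm_num,
    pvCntFrom_eq_sum X Sn 1 le_rfl, sum_pvW_eq X Sn hX]

-- with 0 students, A's fold never changes 'most'
lemma foldA_snd_zero : ∀ (l : List Int) (s : Int × Int),
    (l.foldl (fun (s : Int × Int) x =>
        let c := (PySem.List.pyRange 1 ((0 : Int) + 1) 1).foldl
          (fun c y => if PySem.Int.mod x y == 0 then c + 1 else c) (0 : Int)
        if s.1 ≤ c then (c, if (0 : Int) != 0 then x else s.2) else s) s).2 = s.2 := by
  intro l
  induction l with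
  | nil => intro s; rfl
  | cons a t ih =>
    intro s
    simp only [List.foldl_cons]
    rw [ih]
    split <;> simp

-- for S ≥ 1, A's and B's outer folds end with the same 'most' component:
-- the initial states (0,0) and (-1,0) both update on the first locker (c ≥ 0)
lemma foldAB_eq (Sn : ℕ) (hS : 1 ≤ Sn) : ∀ (l : List Int), (∀ x ∈ l, 1 ≤ x) →
    ∀ (s t : Int × Int), (s = t ∨ (s.1 = 0 ∧ t.1 = -1 ∧ s.2 = t.2)) →
    (l.foldl (fun (s : Int × Int) x =>
        let c := (PySem.List.pyRange 1 ((Sn : Int) + 1) 1).foldl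
          (fun c y => if PySem.Int.mod x y == 0 then c + 1 else c) (0 : Int)
        if s.1 ≤ c then (c, if (Sn : Int) != 0 then x else s.2) else s) s).2
    = (l.foldl (fun (s : Int × Int) x =>
        let c := pvCntFrom x (Sn : Int) 1
        if s.1 ≤ c then (c, x) else s) t).2 := by
  intro l
  induction l with
  | nil =>
    intro _ s t hst
    rcases hst with rfl | ⟨_, _, h⟩
    · rfl
    · exact h
  | cons a l ih =>
    intro hmem s t hst
    simp only [List.foldl_cons]
    have ha : 1 ≤ a := hmem a (List.mem_cons_self ..)
    obtain ⟨A, rfl⟩ : ∃ A : ℕ, a = (A:ℤ) := ⟨a.toNat, (Int.toNat_of_nonneg (by omega)).symm⟩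
    have hA : 1 ≤ A := by exact_mod_cast ha
    have hca := inner_eq A Sn hA
    have hge : (0:ℤ) ≤ pvCntFrom (A : Int) (Sn : Int) 1 := by
      rw [show (1:ℤ) = ((1:ℕ):ℤ) by norm_num, pvCntFrom_eq_sum A Sn 1 le_rfl]
      exact Int.natCast_nonneg _
    have hbne : ((Sn : Int) != 0) = true := by
      simp only [bne_iff_ne, ne_eq, Nat.cast_eq_zero]
      omega
    apply ih (fun x hx => hmem x (List.mem_cons_of_mem _ hx))
    rcases hst with rfl | ⟨h1, h2, h3⟩
    · left
      simp only [hca, hbne, if_true]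
    · left
      simp only [hca, hbne, if_true, h1, h2]
      rw [if_pos hge, if_pos (by omega : (-1:ℤ) ≤ pvCntFrom (A : Int) (Sn : Int) 1)]

-- ===== VERDICT (by name: the statement is the Claim_ definition above) =====
theorem mostTouchableLocker_spec : Claim_equal_mostTouchableLocker := by
  intro L S _
  unfold Spec_mostTouchableLocker mostTouchableLocker mostTouchableLocker_alt
  by_cases hneg : (L < 0 || S < 0) = true
  · rw [if_pos hneg, if_pos hneg]
  · rw [if_neg hneg, if_neg hneg]
    simp only [Bool.or_eq_true, decide_eq_true_eq, not_or, not_lt] at hneg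
    obtain ⟨hL, hS⟩ := hneg
    by_cases hS0 : S = 0
    · subst hS0
      rw [if_pos (by norm_num)]
      simp only []
      rw [foldA_snd_zero]
    · rw [if_neg (by simp [beq_iff_eq, hS0])]
      obtain ⟨Sn, rfl⟩ : ∃ n : ℕ, S = (n:ℤ) := ⟨S.toNat, (Int.toNat_of_nonneg hS).symm⟩
      have hSn : 1 ≤ Sn := by
        rcases Nat.eq_zero_or_pos Sn with h | h
        · exact absurd (by exact_mod_cast congrArg Nat.cast h) hS0
        · exact h
      exact congrArg some (foldAB_eq Sn hSn _
        (fun x hx => ((PySem.List.mem_pyRange_one).mp hx).1) (0, 0) (-1, 0)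
        (Or.inr ⟨rfl, rfl, rfl⟩))
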